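-- pv_equiv track=rewrite | github.com/EngineerMuhammadKhalid/RSAKey-Generator-Python | 1/main.py | sort_and_find_identical
-- ===== SOURCE A (Python) =====
-- def sort_and_find_identical(keys):
--     # Sort the keys by modulus
--     sorted_keys = sorted(keys, key=lambda x: x['modulus'])
--
--     # Find identical keys based on modulus
--     identical_keys = []
--     seen_moduli = set()
--
--     for key in sorted_keys:
--         modulus = key['modulus']
--
--         if modulus not in seen_moduli:
--             seen_moduli.add(modulus)
--         else:
--             identical_keys.append(key)
--
--     return sorted_keys, identical_keys
-- ===== SOURCE B (Python) =====
-- def _dups(lst):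
--     # lst has equal moduli adjacent (sorted); return, run by run,
--     # everything past the first element of each run of equal moduli.
--     if not lst:
--         return []
--     m = lst[0]['modulus']
--     i = 1
--     while i < len(lst) and lst[i]['modulus'] == m:
--         i += 1
--     return lst[1:i] + _dups(lst[i:])
--
--
-- def sort_and_find_identical(keys):
--     sorted_keys = sorted(keys, key=lambda x: x['modulus'])
--     return sorted_keys, _dups(sorted_keys)
-- ===== Notes on version B (the rewrite author's own statement) =====
-- stated objective: alternative
-- what changed: B drops the seen_moduli hash set entirely: after sorting it recursively splits the sorted list into maximal runs of equal modulus and collects each run's tail, instead of a single fold carrying a membership set.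
import Mathlib
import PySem

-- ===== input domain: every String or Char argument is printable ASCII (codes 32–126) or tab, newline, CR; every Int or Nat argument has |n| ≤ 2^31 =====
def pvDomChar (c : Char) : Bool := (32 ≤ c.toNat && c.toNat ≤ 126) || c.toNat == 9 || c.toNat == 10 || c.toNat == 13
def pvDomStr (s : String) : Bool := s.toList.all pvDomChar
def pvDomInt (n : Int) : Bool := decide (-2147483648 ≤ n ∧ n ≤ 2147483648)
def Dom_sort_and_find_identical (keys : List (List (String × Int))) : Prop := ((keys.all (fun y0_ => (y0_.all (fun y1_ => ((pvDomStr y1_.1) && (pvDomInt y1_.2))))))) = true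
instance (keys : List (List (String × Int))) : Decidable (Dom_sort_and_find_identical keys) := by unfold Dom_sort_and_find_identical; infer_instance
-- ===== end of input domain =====

-- B replaces A's seen_moduli-set fold by a recursive run-grouping of the sorted list (collecting each equal-modulus run's tail); equal return values. Pre_ excludes only inputs where A raises KeyError.


-- ===== PORT A =====
-- key['modulus']: first-match association-list lookup; exact under Pre_ (the key is present, so the default 0 is never used)
def pvModulus (k : List (String × Int)) : Int := (PySem.Dict.mk k).getD "modulus" 0

def sort_and_find_identical (keys : List (List (String × Int))) : (List (List (String × Int))) × (List (List (String × Int))) :=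
  let sorted_keys := PySem.List.sorted keys (fun x => pvModulus x) false
  -- for key in sorted_keys: if modulus not in seen_moduli: seen.add(modulus) else: identical.append(key)
  let st := sorted_keys.foldl
    (fun (st : List (List (String × Int)) × PySem.Set Int) key =>
      if PySem.Set.contains st.2 (pvModulus key) = false then
        (st.1, PySem.Set.add st.2 (pvModulus key))
      else
        (st.1 ++ [key], st.2))
    ([], PySem.Set.empty)
  (sorted_keys, st.1)

-- ===== PORT B =====
-- _dups: lst[1:i] is the tail of the first run of equal moduli (takeWhile on the tail),
-- lst[i:] is the rest (dropWhile on the tail); exact port of the index-scan while loop.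
def pvDups : List (List (String × Int)) → List (List (String × Int))
  | [] => []
  | k :: t =>
    t.takeWhile (fun k' => pvModulus k' == pvModulus k)
      ++ pvDups (t.dropWhile (fun k' => pvModulus k' == pvModulus k))
termination_by l => l.length
decreasing_by
  simp only [List.length_cons]
  exact Nat.lt_succ_of_le (List.length_dropWhile_le _ _)

def sort_and_find_identical_alt (keys : List (List (String × Int))) : (List (List (String × Int))) × (List (List (String × Int))) :=
  let sorted_keys := PySem.List.sorted keys (fun x => pvModulus x) false
  (sorted_keys, pvDups sorted_keys)

-- ===== PRECONDITION & SPEC =====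
-- Pre_ excludes exactly the inputs where some key dict lacks 'modulus': Python A raises KeyError there.
def Pre_sort_and_find_identical (keys : List (List (String × Int))) : Prop :=
  ∀ k ∈ keys, (PySem.Dict.mk k).contains "modulus" = true
instance (keys : List (List (String × Int))) : Decidable (Pre_sort_and_find_identical keys) := by unfold Pre_sort_and_find_identical; infer_instance
def pvWitness_sort_and_find_identical : (List (List (String × Int))) := [[("modulus", 5), ("e", 3)], [("modulus", 5)], [("modulus", 2)]]

def Spec_sort_and_find_identical (keys : List (List (String × Int))) (out : (List (List (String × Int))) × (List (List (String × Int)))) : Prop := out = sort_and_find_identical_alt keys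
instance (keys : List (List (String × Int))) (out : (List (List (String × Int))) × (List (List (String × Int)))) : Decidable (Spec_sort_and_find_identical keys out) := by unfold Spec_sort_and_find_identical; infer_instance

-- ===== CLAIM (what is proved, stated in full; the proofs are below) =====
def Claim_equal_sort_and_find_identical : Prop := ∀ (keys : List (List (String × Int))), Dom_sort_and_find_identical keys → Pre_sort_and_find_identical keys → Spec_sort_and_find_identical keys (sort_and_find_identical keys)

-- ===== LEMMAS AND PROOFS =====

-- Folding A's step over a run whose moduli are all already seen just appends the run.
theorem pv_fold_run (run : List (List (String × Int)))
    (acc : List (List (String × Int))) (s : PySem.Set Int)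
    (h : ∀ k ∈ run, PySem.Set.contains s (pvModulus k) = true) :
    run.foldl
      (fun (st : List (List (String × Int)) × PySem.Set Int) key =>
        if PySem.Set.contains st.2 (pvModulus key) = false then
          (st.1, PySem.Set.add st.2 (pvModulus key))
        else
          (st.1 ++ [key], st.2))
      (acc, s) = (acc ++ run, s) := by
  induction run generalizing acc with
  | nil => simp
  | cons k t ih =>
    rw [List.foldl_cons]
    have hk := h k (List.mem_cons_self ..)
    rw [if_neg (by rw [hk]; simp)]
    rw [ih (acc ++ [k]) (fun k' hk' => h k' (List.mem_cons_of_mem _ hk'))]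
    simp

-- In a nondecreasing list whose elements' moduli are all ≥ m, every element surviving
-- dropWhile (modulus == m) has modulus strictly greater than m.
theorem pv_dropWhile_ne (m : Int) (t : List (List (String × Int)))
    (hp : t.Pairwise (fun a b => pvModulus a ≤ pvModulus b))
    (hge : ∀ k ∈ t, m ≤ pvModulus k) :
    ∀ k ∈ t.dropWhile (fun k' => pvModulus k' == m), m < pvModulus k := by
  induction t with
  | nil => simp
  | cons a t' ih =>
    rw [List.dropWhile_cons]
    by_cases ha : (pvModulus a == m) = true
    · rw [if_pos ha]
      exact ih (List.pairwise_cons.mp hp).2 (fun k hk => hge k (List.mem_cons_of_mem _ hk))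
    · rw [if_neg ha]
      have hane : pvModulus a ≠ m := by
        intro h; exact ha (by simp [h])
      have halt : m < pvModulus a :=
        lt_of_le_of_ne (hge a (List.mem_cons_self ..)) (Ne.symm hane)
      intro k hk
      rcases List.mem_cons.mp hk with h | h
      · rw [h]; exact halt
      · exact lt_of_lt_of_le halt ((List.pairwise_cons.mp hp).1 k h)

-- Main invariant: on a nondecreasing list none of whose moduli are in s, A's fold
-- produces acc ++ (run-grouped duplicates).
theorem pv_fold_dups (n : Nat) (l : List (List (String × Int))) (hn : l.length ≤ n)
    (acc : List (List (String × Int))) (s : PySem.Set Int)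
    (hp : l.Pairwise (fun a b => pvModulus a ≤ pvModulus b))
    (hs : ∀ k ∈ l, PySem.Set.contains s (pvModulus k) = false) :
    (l.foldl
      (fun (st : List (List (String × Int)) × PySem.Set Int) key =>
        if PySem.Set.contains st.2 (pvModulus key) = false then
          (st.1, PySem.Set.add st.2 (pvModulus key))
        else
          (st.1 ++ [key], st.2))
      (acc, s)).1 = acc ++ pvDups l := by
  induction n generalizing l acc s with
  | zero =>
    have : l = [] := List.eq_nil_of_length_eq_zero (Nat.le_zero.mp hn)
    subst this; simp [pvDups]
  | succ n ih =>
    match l with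
    | [] => simp [pvDups]
    | k :: t =>
      rw [List.foldl_cons, if_pos (hs k (List.mem_cons_self ..)), pvDups]
      have hpt := (List.pairwise_cons.mp hp).2
      have hkt := (List.pairwise_cons.mp hp).1
      have hsplit := List.takeWhile_append_dropWhile
        (p := fun k' => pvModulus k' == pvModulus k) (l := t)
      conv_lhs => rw [← hsplit]
      rw [List.foldl_append]
      have hrun : ∀ k' ∈ t.takeWhile (fun k' => pvModulus k' == pvModulus k),
          PySem.Set.contains (PySem.Set.add s (pvModulus k)) (pvModulus k') = true := by
        intro k' hk'
        have heq : pvModulus k' = pvModulus k := by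
          have := List.mem_takeWhile_imp hk'
          simpa using this
        rw [heq, PySem.Set.contains_iff, PySem.Set.mem_add]
        right; rfl
      rw [pv_fold_run _ acc _ hrun]
      have hrest := pv_dropWhile_ne (pvModulus k) t hpt hkt
      have hlen : (t.dropWhile (fun k' => pvModulus k' == pvModulus k)).length ≤ n := by
        have h1 := List.length_dropWhile_le (fun k' => pvModulus k' == pvModulus k) t
        have h2 : t.length + 1 ≤ n + 1 := by simpa using hn
        omega
      have hrec := ih (t.dropWhile (fun k' => pvModulus k' == pvModulus k)) hlen
        (acc ++ t.takeWhile (fun k' => pvModulus k' == pvModulus k))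
        (PySem.Set.add s (pvModulus k))
        (hpt.sublist (List.dropWhile_sublist _))
        (by
          intro k' hk'
          have hne : pvModulus k < pvModulus k' := hrest k' hk'
          have hsf : PySem.Set.contains s (pvModulus k') = false :=
            hs k' (List.mem_cons_of_mem _ ((List.dropWhile_sublist _).mem hk'))
          rw [Bool.eq_false_iff]
          intro hc
          rw [PySem.Set.contains_iff, PySem.Set.mem_add] at hc
          rcases hc with h | h
          · have : PySem.Set.contains s (pvModulus k') = true :=
              (PySem.Set.contains_iff _ _).mpr h
            rw [hsf] at this; cases this
          · omega)
      rw [hrec, List.append_assoc]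

-- ===== VERDICT (by name: the statement is the Claim_ definition above) =====
theorem sort_and_find_identical_spec : Claim_equal_sort_and_find_identical := by
  intro keys _ _
  unfold Spec_sort_and_find_identical sort_and_find_identical sort_and_find_identical_alt
  have h := pv_fold_dups (PySem.List.sorted keys (fun x => pvModulus x) false).length
    (PySem.List.sorted keys (fun x => pvModulus x) false) le_rfl [] PySem.Set.empty
    (PySem.List.sorted_pairwise keys (fun x => pvModulus x))
    (by intro k _; simp [PySem.Set.empty])
  simpa using congrArg (Prod.mk (PySem.List.sorted keys (fun x => pvModulus x) false)) h
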